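-- pv_equiv track=rewrite | github.com/paul-vautier/aoc2024 | day-7/main.py | dfs
-- ===== SOURCE A (Python) =====
-- def dfs(target: int, current: int, nums: [int]) -> bool:
--     if current == target and not nums:
--         return True
--     if not nums:
--         return False
--     if target < current:
--         return False
--
--     return dfs(target, current + nums[0], nums[1:]) or dfs(target, current * nums[0], nums[1:])
-- ===== SOURCE B (Python) =====
-- def dfs(target: int, current: int, nums: [int]) -> bool:
--     frontier = [current]
--     for n in nums:
--         frontier = [w for v in frontier if v <= target for w in (v + n, v * n)]
--     return target in frontier
-- ===== Notes on version B (the rewrite author's own statement) =====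
-- stated objective: alternative
-- what changed: Replaced the recursive branching DFS by an iterative breadth-first frontier propagation: a list of reachable values is filtered by the <= target prune and expanded by +n and *n for each num in turn, then target membership is tested.
import Mathlib
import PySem

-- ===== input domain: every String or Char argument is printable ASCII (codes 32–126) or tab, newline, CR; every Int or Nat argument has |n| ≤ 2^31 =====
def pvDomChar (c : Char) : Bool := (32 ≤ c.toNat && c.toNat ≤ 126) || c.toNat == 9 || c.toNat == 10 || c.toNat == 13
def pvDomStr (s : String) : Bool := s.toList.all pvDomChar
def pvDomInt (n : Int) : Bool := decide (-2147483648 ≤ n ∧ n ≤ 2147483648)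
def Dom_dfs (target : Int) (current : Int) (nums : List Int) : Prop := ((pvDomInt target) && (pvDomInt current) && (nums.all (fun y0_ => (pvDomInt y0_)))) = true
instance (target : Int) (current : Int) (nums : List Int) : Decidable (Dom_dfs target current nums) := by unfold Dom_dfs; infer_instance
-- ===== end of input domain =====

-- B replaces the recursive branching DFS by an iterative frontier propagation over a list
-- of reachable values (alternative decomposition, same cost).


-- ===== PORT A =====
def dfs (target : Int) (current : Int) (nums : List Int) : Bool :=
  match nums with
  | [] => current == target            -- "current == target and not nums" → True; "not nums" → False
  | n :: rest =>
    if target < current then false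
    else dfs target (current + n) rest || dfs target (current * n) rest

-- ===== PORT B =====
def dfs_alt (target : Int) (current : Int) (nums : List Int) : Bool :=
  (nums.foldl
    (fun frontier n =>
      (frontier.filter (fun v => v ≤ target)).flatMap (fun v => [v + n, v * n]))
    [current]).contains target

-- ===== PRECONDITION & SPEC =====
def Spec_dfs (target : Int) (current : Int) (nums : List Int) (out : Bool) : Prop := out = dfs_alt target current nums
instance (target : Int) (current : Int) (nums : List Int) (out : Bool) : Decidable (Spec_dfs target current nums out) := by unfold Spec_dfs; infer_instance

-- ===== CLAIM (what is proved, stated in full; the proofs are below) =====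
def Claim_equal_dfs : Prop := ∀ (target : Int) (current : Int) (nums : List Int), Dom_dfs target current nums → Spec_dfs target current nums (dfs target current nums)

-- ===== LEMMAS AND PROOFS =====

-- Core invariant: target is in the fully propagated frontier iff some value of the
-- current frontier S leads A's DFS to success.
theorem dfs_frontier (target : Int) (nums : List Int) (S : List Int) :
    (nums.foldl
      (fun frontier n =>
        (frontier.filter (fun v => v ≤ target)).flatMap (fun v => [v + n, v * n]))
      S).contains target
    = S.any (fun v => dfs target v nums) := by
  induction nums generalizing S with
  | nil =>
    simp only [List.foldl_nil, dfs]
    induction S with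
    | nil => simp
    | cons a S ih =>
      simp only [List.contains_cons, List.any_cons, ih]
      congr 1
      exact Bool.beq_comm
  | cons n rest ih =>
    simp only [List.foldl_cons, ih]
    simp only [List.any_flatMap, List.any_filter, dfs]
    apply List.any_congr rfl
    intro v
    by_cases h : target < v
    · simp [h, not_le.mpr h]
    · simp [h, not_lt.mp h]

-- ===== VERDICT (by name: the statement is the Claim_ definition above) =====
theorem dfs_spec : Claim_equal_dfs := by
  intro target current nums _
  unfold Spec_dfs dfs_alt
  rw [dfs_frontier]
  simp
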